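-- pv_equiv track=rewrite | github.com/tianhm/lue | lue/ui.py | _extract_core_word
-- ===== SOURCE A (Python) =====
-- def _extract_core_word(token: str) -> str:
--     """
--     Extract the core word from a token by removing surrounding punctuation.
--
--     This function is more robust than simple strip() as it handles nested
--     punctuation and preserves internal punctuation like contractions.
--
--     Args:
--         token: The token to process
--
--     Returns:
--         The core word without surrounding punctuation
--     """
--     if not token:
--         return token
--
--     # Remove leading punctuation
--     start = 0
--     while start < len(token) and not token[start].isalnum():
--         start += 1
--
--     # Remove trailing punctuation
--     end = len(token) - 1
--     while end >= start and not token[end].isalnum():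
--         end -= 1
--
--     if start <= end:
--         return token[start:end + 1]
--     else:
--         return ""
-- ===== SOURCE B (Python) =====
-- def _extract_core_word(token: str) -> str:
--     idxs = [i for i, c in enumerate(token) if c.isalnum()]
--     return token[idxs[0]:idxs[-1] + 1] if idxs else ""
-- ===== Notes on version B (the rewrite author's own statement) =====
-- stated objective: simpler
-- what changed: Replaced A's two directional boundary while-loops (one scanning forward from the start, one backward from the end, then a final branch) by a single enumerate pass that collects all alphanumeric positions and slices the token between the first and last one; the empty-index case covers both A's empty-token and all-punctuation branches.
import Mathlib
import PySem

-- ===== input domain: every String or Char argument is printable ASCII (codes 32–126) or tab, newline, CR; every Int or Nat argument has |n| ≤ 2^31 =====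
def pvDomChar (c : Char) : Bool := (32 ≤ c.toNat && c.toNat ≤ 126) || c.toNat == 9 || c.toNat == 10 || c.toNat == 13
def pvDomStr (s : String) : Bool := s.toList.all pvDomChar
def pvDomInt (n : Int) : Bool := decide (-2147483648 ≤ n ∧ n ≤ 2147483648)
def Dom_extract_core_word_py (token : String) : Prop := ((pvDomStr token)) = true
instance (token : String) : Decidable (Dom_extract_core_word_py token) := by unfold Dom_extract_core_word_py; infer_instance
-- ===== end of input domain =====

-- B replaces A's two boundary while-loops by one enumerate pass collecting the alnum
-- positions and slicing between the first and the last one (objective: simpler).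

-- ===== PORT A =====
-- 'while start < len(token) and not token[start].isalnum(): start += 1'
def aStart (cs : List Char) (start : Nat) : Nat :=
  if h : start < cs.length ∧ ¬(PySem.Chars.isalnum (cs.getD start ' ') = true) then
    aStart cs (start + 1)
  else start
termination_by cs.length - start
decreasing_by have := h.1; omega

-- 'while end >= start and not token[end].isalnum(): end -= 1';
-- the counter is shifted by one (e = end + 1) so it stays a Nat: 'end >= start' is 'start < e'
def aEnd (cs : List Char) (start : Nat) (e : Nat) : Nat :=
  if h : start < e ∧ ¬(PySem.Chars.isalnum (cs.getD (e - 1) ' ') = true) then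
    aEnd cs start (e - 1)
  else e
termination_by e
decreasing_by have := h.1; omega

def extract_core_word_py (token : String) : String :=
  if token.toList.isEmpty then token
  else
    let start := aStart token.toList 0
    let e := aEnd token.toList start token.toList.length   -- e = end + 1
    if start < e then   -- 'start <= end'
      String.ofList (PySem.List.slice token.toList (some (start : Int)) (some (e : Int)))
    else ""

-- ===== PORT B =====
def extract_core_word_py_alt (token : String) : String :=
  let idxs := ((PySem.List.enumerate token.toList).filter fun ic => PySem.Chars.isalnum ic.2).map (·.1)
  if idxs.isEmpty then ""
  else String.ofList (PySem.List.slice token.toList (some (idxs.headD 0)) (some (idxs.getLastD 0 + 1)))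

-- ===== PRECONDITION & SPEC =====
def Spec_extract_core_word_py (token : String) (out : String) : Prop := out = extract_core_word_py_alt token
instance (token : String) (out : String) : Decidable (Spec_extract_core_word_py token out) := by unfold Spec_extract_core_word_py; infer_instance

-- ===== CLAIM (what is proved, stated in full; the proofs are below) =====
def Claim_equal_extract_core_word_py : Prop := ∀ (token : String), Dom_extract_core_word_py token → Spec_extract_core_word_py token (extract_core_word_py token)

-- ===== LEMMAS AND PROOFS =====

/-- "not alnum" predicate the two boundary scans drop. -/
def qna (c : Char) : Bool := !PySem.Chars.isalnum c

/-- B's index list, with explicit start offset. -/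
def jfun (cs : List Char) (s : Int) : List Int :=
  ((PySem.List.enumerate cs s).filter fun ic => PySem.Chars.isalnum ic.2).map (·.1)

theorem jfun_nil (s : Int) : jfun [] s = [] := rfl

theorem jfun_cons (c : Char) (cs : List Char) (s : Int) :
    jfun (c :: cs) s = if PySem.Chars.isalnum c then s :: jfun cs (s + 1) else jfun cs (s + 1) := by
  cases hc : PySem.Chars.isalnum c <;>
    simp [jfun, PySem.List.enumerate_cons, hc]

theorem jfun_concat (cs : List Char) (x : Char) (s : Int) :
    jfun (cs ++ [x]) s = jfun cs s ++ (if PySem.Chars.isalnum x then [s + cs.length] else []) := by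
  cases hx : PySem.Chars.isalnum x <;>
    simp [jfun, PySem.List.enumerate_append, PySem.List.enumerate_cons, List.filter_append, hx]

theorem jfun_eq_nil_iff (cs : List Char) (s : Int) :
    jfun cs s = [] ↔ cs.dropWhile qna = [] := by
  induction cs generalizing s with
  | nil => simp [jfun_nil]
  | cons c cs ih =>
    rw [jfun_cons]
    cases hc : PySem.Chars.isalnum c
    · simp [hc, qna, ih]
    · simp [hc, qna]

theorem jfun_headD (cs : List Char) (s : Int) (h : jfun cs s ≠ []) :
    (jfun cs s).headD 0 = s + ((cs.takeWhile qna).length : Int) := by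
  induction cs generalizing s with
  | nil => simp [jfun_nil] at h
  | cons c cs ih =>
    rw [jfun_cons] at h ⊢
    cases hc : PySem.Chars.isalnum c
    · rw [hc] at h
      simp only [if_neg (by simp : ¬ (false = true))] at h ⊢
      rw [ih _ h]
      simp [qna, hc]
      omega
    · simp [hc, qna]

theorem jfun_getLastD (cs : List Char) : ∀ (s : Int), jfun cs s ≠ [] →
    (jfun cs s).getLastD 0 = s + (cs.length : Int) - 1 - ((cs.reverse.takeWhile qna).length : Int) := by
  induction cs using List.reverseRecOn with
  | nil => intro s h; simp [jfun_nil] at h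
  | append_singleton cs x ih =>
    intro s h
    rw [jfun_concat] at h ⊢
    cases hx : PySem.Chars.isalnum x
    · rw [hx] at h
      simp only [if_neg (by simp : ¬ (false = true)), List.append_nil] at h ⊢
      rw [ih _ h]
      have hrev : ((cs ++ [x]).reverse.takeWhile qna) = x :: (cs.reverse.takeWhile qna) := by
        simp [qna, hx]
      rw [hrev]
      simp; omega
    · have hrev : ((cs ++ [x]).reverse.takeWhile qna) = [] := by
        simp [qna, hx]
      rw [if_pos rfl, List.getLastD_concat, hrev]
      simp; omega

theorem aStart_eq (cs : List Char) : ∀ (s : Nat),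
    aStart cs s = s + ((cs.drop s).takeWhile qna).length := by
  intro s
  induction s using aStart.induct cs with
  | case1 s h ih =>
    rw [aStart, dif_pos h]
    obtain ⟨hlt, hna⟩ := h
    rw [List.drop_eq_getElem_cons hlt, List.takeWhile_cons]
    rw [List.getD_eq_getElem cs ' ' hlt] at hna
    have hq : qna cs[s] = true := by simp [qna]; simpa using hna
    rw [hq, if_pos rfl]
    simp [ih]; omega
  | case2 s h =>
    rw [aStart, dif_neg h]
    rcases Decidable.em (s < cs.length) with hlt | hge
    · rw [List.drop_eq_getElem_cons hlt, List.takeWhile_cons]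
      have hal : PySem.Chars.isalnum (cs.getD s ' ') = true := by
        by_contra hc; exact h ⟨hlt, hc⟩
      rw [List.getD_eq_getElem cs ' ' hlt] at hal
      have hq : qna cs[s] = false := by simp [qna, hal]
      simp [hq]
    · rw [List.drop_eq_nil_of_le (by omega)]; simp

theorem aEnd_eq (cs : List Char) (s : Nat) : ∀ (e : Nat), e ≤ cs.length → s ≤ e →
    aEnd cs s e = s + (((cs.take e).drop s).rdropWhile qna).length := by
  intro e
  induction e using aEnd.induct cs s with
  | case1 e h ih =>
    intro hle hse
    obtain ⟨hlt, hna⟩ := h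
    have he1 : e - 1 < cs.length := by omega
    have hnaE : ¬ PySem.Chars.isalnum cs[e - 1] = true := by
      rwa [List.getD_eq_getElem cs ' ' he1] at hna
    have hsplit : cs.take e = cs.take (e - 1) ++ [cs[e - 1]] := by
      have h2 : cs.take (e - 1 + 1) = cs.take (e - 1) ++ cs[e - 1]?.toList := List.take_add_one
      rw [List.getElem?_eq_getElem he1, Nat.sub_add_cancel (by omega)] at h2
      simpa using h2
    have hq : qna cs[e - 1] = true := by simp [qna]; simpa using hnaE
    rw [aEnd, dif_pos ⟨hlt, hna⟩, hsplit,
        List.drop_append_of_le_length (by simp; omega),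
        List.rdropWhile_concat_pos qna _ _ hq]
    exact ih (by omega) (by omega)
  | case2 e h =>
    intro hle hse
    rw [aEnd, dif_neg h]
    rcases Decidable.em (s < e) with hlt | hge
    · have hal : PySem.Chars.isalnum (cs.getD (e - 1) ' ') = true := by
        by_contra hc; exact h ⟨hlt, hc⟩
      have he1 : e - 1 < cs.length := by omega
      rw [List.getD_eq_getElem cs ' ' he1] at hal
      have hsplit : cs.take e = cs.take (e - 1) ++ [cs[e - 1]] := by
        have h2 : cs.take (e - 1 + 1) = cs.take (e - 1) ++ cs[e - 1]?.toList := List.take_add_one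
        rw [List.getElem?_eq_getElem he1, Nat.sub_add_cancel (by omega)] at h2
        simpa using h2
      have hq : ¬ qna cs[e - 1] = true := by simp [qna, hal]
      rw [hsplit, List.drop_append_of_le_length (by simp; omega),
          List.rdropWhile_concat_neg qna _ _ hq]
      have hlen : ((cs.take (e - 1)).drop s ++ [cs[e - 1]]).length = e - s := by
        simp; omega
      rw [hlen]; omega
    · have heq : e = s := by omega
      subst heq
      rw [List.drop_eq_nil_of_le (by simp)]
      simp [List.rdropWhile]

theorem drop_takeWhile_length (p : Char → Bool) (cs : List Char) :
    cs.drop (cs.takeWhile p).length = cs.dropWhile p := by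
  have h : ((cs.takeWhile p) ++ (cs.dropWhile p)).drop (cs.takeWhile p).length
      = cs.dropWhile p := List.drop_left
  rwa [List.takeWhile_append_dropWhile] at h

theorem takeWhile_reverse_of_dropWhile_ne_nil (cs : List Char)
    (ht : cs.dropWhile qna ≠ []) :
    cs.reverse.takeWhile qna = (cs.dropWhile qna).reverse.takeWhile qna := by
  conv_lhs => rw [← List.takeWhile_append_dropWhile (p := qna) (l := cs)]
  rw [List.reverse_append, List.takeWhile_append]
  have hhead : qna ((cs.dropWhile qna).head ht) = false := by
    simpa [qna] using List.head_dropWhile_not qna (w := ht)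
  split
  · rename_i hlen
    have hpre := List.takeWhile_prefix (l := (cs.dropWhile qna).reverse) (p := qna)
    have heq : (cs.dropWhile qna).reverse.takeWhile qna = (cs.dropWhile qna).reverse :=
      List.IsPrefix.eq_of_length hpre hlen
    have hall := List.takeWhile_eq_self_iff.mp heq
    have hmem : (cs.dropWhile qna).head ht ∈ (cs.dropWhile qna).reverse := by
      simp [List.head_mem]
    have := hall _ hmem
    simp [hhead] at this
  · rfl

theorem alt_eq (token : String) :
    extract_core_word_py_alt token =
      (if (jfun token.toList 0).isEmpty then ""
       else String.ofList (PySem.List.slice token.toList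
              (some ((jfun token.toList 0).headD 0))
              (some ((jfun token.toList 0).getLastD 0 + 1)))) := rfl

theorem a_eq (token : String) (h : ¬ token.toList.isEmpty = true) :
    extract_core_word_py token =
      (if aStart token.toList 0 < aEnd token.toList (aStart token.toList 0) token.toList.length
       then String.ofList (PySem.List.slice token.toList
              (some ((aStart token.toList 0) : Int))
              (some ((aEnd token.toList (aStart token.toList 0) token.toList.length) : Int)))
       else "") := by
  unfold extract_core_word_py
  rw [if_neg h]

theorem main_eq (token : String) :
    extract_core_word_py token = extract_core_word_py_alt token := by
  by_cases hnil : token.toList = []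
  · have htok : token = "" := String.toList_eq_nil_iff.mp hnil
    subst htok
    rw [alt_eq]
    simp [extract_core_word_py, jfun_nil]
  · rw [a_eq token (by simpa using hnil), alt_eq]
    have hstart : aStart token.toList 0 = (token.toList.takeWhile qna).length := by
      rw [aStart_eq]; simp
    have hk_le : (token.toList.takeWhile qna).length ≤ token.toList.length :=
      (List.takeWhile_prefix qna).length_le
    have hend : aEnd token.toList ((token.toList.takeWhile qna).length) token.toList.length
        = (token.toList.takeWhile qna).length
          + ((token.toList.dropWhile qna).rdropWhile qna).length := by
      rw [aEnd_eq token.toList _ token.toList.length le_rfl hk_le, List.take_length,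
        drop_takeWhile_length]
    rw [hstart, hend]
    by_cases ht : token.toList.dropWhile qna = []
    · have hkl : (token.toList.takeWhile qna).length = token.toList.length := by
        have h1 := List.takeWhile_append_dropWhile (p := qna) (l := token.toList)
        rw [ht, List.append_nil] at h1
        rw [h1]
      have hj : jfun token.toList 0 = [] := (jfun_eq_nil_iff token.toList 0).mpr ht
      rw [ht]
      simp [hj]
    · have hj : jfun token.toList 0 ≠ [] := by
        rw [Ne, jfun_eq_nil_iff]; exact ht
      have hhead : qna ((token.toList.dropWhile qna).head ht) = false := by
        simpa [qna] using List.head_dropWhile_not qna (w := ht)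
      have hr : (token.toList.dropWhile qna).rdropWhile qna ≠ [] := by
        rw [Ne, List.rdropWhile_eq_nil_iff]
        intro hall
        have := hall _ (List.head_mem ht)
        rw [hhead] at this; cases this
      have hrpos : 0 < ((token.toList.dropWhile qna).rdropWhile qna).length :=
        List.length_pos_of_ne_nil hr
      rw [if_pos (by omega), if_neg (by simpa using hj)]
      -- the length bookkeeping
      have h1 : token.toList.reverse.takeWhile qna
          = (token.toList.dropWhile qna).reverse.takeWhile qna :=
        takeWhile_reverse_of_dropWhile_ne_nil token.toList ht
      have h2 : ((token.toList.dropWhile qna).reverse.takeWhile qna).length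
            + ((token.toList.dropWhile qna).reverse.dropWhile qna).length
          = (token.toList.dropWhile qna).length := by
        have := List.takeWhile_append_dropWhile (p := qna)
          (l := (token.toList.dropWhile qna).reverse)
        have hlen := congrArg List.length this
        rw [List.length_append] at hlen
        simpa using hlen
      have h3 : ((token.toList.dropWhile qna).rdropWhile qna).length
          = ((token.toList.dropWhile qna).reverse.dropWhile qna).length := by
        simp [List.rdropWhile]
      have h4 : (token.toList.takeWhile qna).length + (token.toList.dropWhile qna).length
          = token.toList.length := by
        have := List.takeWhile_append_dropWhile (p := qna) (l := token.toList)
        have hlen := congrArg List.length this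
        rw [List.length_append] at hlen
        exact hlen
      have e1 : (jfun token.toList 0).headD 0
          = ((token.toList.takeWhile qna).length : Int) := by
        rw [jfun_headD token.toList 0 hj]; ring
      have e2 : (jfun token.toList 0).getLastD 0 + 1
          = (((token.toList.takeWhile qna).length
              + ((token.toList.dropWhile qna).rdropWhile qna).length : Nat) : Int) := by
        rw [jfun_getLastD token.toList 0 hj]
        have h1len : (token.toList.reverse.takeWhile qna).length
            = ((token.toList.dropWhile qna).reverse.takeWhile qna).length := by rw [h1]
        rw [h1len]
        push_cast
        omega
      rw [e1, e2]

-- ===== VERDICT (by name: the statement is the Claim_ definition above) =====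
theorem extract_core_word_py_spec : Claim_equal_extract_core_word_py := by
  intro token _
  unfold Spec_extract_core_word_py
  exact main_eq token
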